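-- pv_equiv track=rewrite | github.com/ekhar/db_final | make_tree.py | moves_correct
-- ===== SOURCE A (Python) =====
-- def moves_correct(s):
--     s = s.split()
--     ret = []
--     for count,i in enumerate(s):
--         if count == 0 or count%3 == 0:
--             pass
--         else:
--             ret.append(i)
--
--     return ret
-- ===== SOURCE B (Python) =====
-- def moves_correct(s):
--     tokens = s.split()
--     del tokens[::3]
--     return tokens
-- ===== Notes on version B (the rewrite author's own statement) =====
-- stated objective: idiomatic
-- what changed: Replaces the enumerate loop with its per-element modulo test and conditional append by building the full token list and deleting every third element (indices 0,3,6,...) with one strided slice deletion.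
import Mathlib
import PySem

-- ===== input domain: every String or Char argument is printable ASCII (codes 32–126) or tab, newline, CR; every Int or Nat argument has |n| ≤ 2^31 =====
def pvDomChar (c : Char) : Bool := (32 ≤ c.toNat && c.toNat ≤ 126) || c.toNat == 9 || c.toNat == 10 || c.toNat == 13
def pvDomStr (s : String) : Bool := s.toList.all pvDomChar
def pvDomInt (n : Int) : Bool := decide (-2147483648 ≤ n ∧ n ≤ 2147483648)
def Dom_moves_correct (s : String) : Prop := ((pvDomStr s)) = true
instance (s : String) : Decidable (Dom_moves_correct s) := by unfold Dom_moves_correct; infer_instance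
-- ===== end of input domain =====

-- B replaces the enumerate/mod-test/append loop by building the token list and
-- deleting every third element (a strided slice deletion); idiomatic, same cost.

-- ===== PORT A =====
def moves_correct (s : String) : List String :=
  (PySem.List.enumerate (PySem.Str.split₀ s) 0).foldl
    (fun ret ci => if ci.1 == 0 || ci.1 % 3 == 0 then ret else ret ++ [ci.2]) []

-- ===== PORT B =====
-- 'del tokens[::3]': drop every element at index 0,3,6,… — chunkwise recursion.
def delEvery3 : List String → List String
  | [] => []
  | [_] => []
  | [_, y] => [y]
  | _ :: y :: z :: rest => y :: z :: delEvery3 rest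

def moves_correct_alt (s : String) : List String :=
  delEvery3 (PySem.Str.split₀ s)

-- ===== PRECONDITION & SPEC =====
def Spec_moves_correct (s : String) (out : List String) : Prop := out = moves_correct_alt s
instance (s : String) (out : List String) : Decidable (Spec_moves_correct s out) := by unfold Spec_moves_correct; infer_instance

-- ===== CLAIM (what is proved, stated in full; the proofs are below) =====
def Claim_equal_moves_correct : Prop := ∀ (s : String), Dom_moves_correct s → Spec_moves_correct s (moves_correct s)

-- ===== LEMMAS AND PROOFS =====

theorem foldl_enumerate_eq_delEvery3 (l : List String) (n : Int) (hn : n % 3 = 0)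
    (acc : List String) :
    (PySem.List.enumerate l n).foldl
      (fun ret ci => if ci.1 == 0 || ci.1 % 3 == 0 then ret else ret ++ [ci.2]) acc
      = acc ++ delEvery3 l := by
  induction l using delEvery3.induct generalizing n acc with
  | case1 => simp [PySem.List.enumerate_nil, delEvery3]
  | case2 x =>
      have h0 : n = 0 ∨ 3 ∣ n := Or.inr (by omega)
      simp [PySem.List.enumerate_cons, PySem.List.enumerate_nil, delEvery3, h0]
  | case3 x y =>
      have h0 : n = 0 ∨ 3 ∣ n := Or.inr (by omega)
      have h1 : ¬(n + 1 = 0 ∨ 3 ∣ n + 1) := by omega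
      simp [PySem.List.enumerate_cons, PySem.List.enumerate_nil, delEvery3, h0, h1]
  | case4 x y z rest ih =>
      have h0 : n = 0 ∨ 3 ∣ n := Or.inr (by omega)
      have h1 : ¬(n + 1 = 0 ∨ 3 ∣ n + 1) := by omega
      have h2 : ¬(n + 1 + 1 = 0 ∨ 3 ∣ n + 1 + 1) := by omega
      have h3 : (n + 1 + 1 + 1) % 3 = 0 := by omega
      have ih' := ih (n + 1 + 1 + 1) h3 (acc ++ [y, z])
      simp [PySem.List.enumerate_cons, delEvery3, h0, h1, h2]
      simpa using ih' 

-- ===== VERDICT (by name: the statement is the Claim_ definition above) =====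
theorem moves_correct_spec : Claim_equal_moves_correct := by
  intro s _
  unfold Spec_moves_correct moves_correct moves_correct_alt
  simpa using foldl_enumerate_eq_delEvery3 (PySem.Str.split₀ s) 0 (by decide) []
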